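-- pv_equiv track=rewrite | github.com/jrfl/uorelated | razore/common.py | convertFromEUO
-- ===== SOURCE A (Python) =====
-- def convertFromEUO(strID):
--     #test = """YPO_BNF_CPH_INF_FSF_OSF_ASF_HNF_FMH_CNF_LSF_NSF_ISF_SMH_RMH_CSF_ZRF_MPH_""" +
--     #"""LPH_MSF_BSF_KPO_GUO_KTF_JTF_BPH_EPH_ZSF_ATF_JPH_SOH_POH_NMH_OMH_LPO_ZTO_XTH_YTH_""" +
--     #"""HSF_KSF_NPO_XPO_FUO_JPO_QPF_NPF_KPH_FYG_RHM_SFR"""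
--     test = strID.upper()
--     test_array = test.split('_')
--     result = ""
--     for item in test_array:
--         i = 1
--         decid = 0
--         for c in item:
--             decid = decid + ( ord(c) - ord('A')) * i
--             i = i * 26
--         decid = (decid - 7) ^ 69
--         result = result + "0x{:x}, ".format(decid)
--     return result
-- ===== SOURCE B (Python) =====
-- def convertFromEUO(strID):
--     # Single backward pass over the whole string: no split, tokens are flushed
--     # at each '_' while Horner-accumulating, output assembled back-to-front.
--     parts = []
--     acc = 0
--     for c in reversed(strID.upper()):
--         if c == '_':
--             parts.append("0x{:x}, ".format((acc - 7) ^ 69))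
--             acc = 0
--         else:
--             acc = acc * 26 + (ord(c) - ord('A'))
--     parts.append("0x{:x}, ".format((acc - 7) ^ 69))
--     return "".join(parts[::-1])
-- ===== Notes on version B (the rewrite author's own statement) =====
-- stated objective: alternative
-- what changed: Replaces A's split-into-tokens plus nested per-token loop with a single backward pass over the whole string that Horner-accumulates and flushes a formatted part at each underscore separator, building the output back-to-front and joining once.
import Mathlib
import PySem

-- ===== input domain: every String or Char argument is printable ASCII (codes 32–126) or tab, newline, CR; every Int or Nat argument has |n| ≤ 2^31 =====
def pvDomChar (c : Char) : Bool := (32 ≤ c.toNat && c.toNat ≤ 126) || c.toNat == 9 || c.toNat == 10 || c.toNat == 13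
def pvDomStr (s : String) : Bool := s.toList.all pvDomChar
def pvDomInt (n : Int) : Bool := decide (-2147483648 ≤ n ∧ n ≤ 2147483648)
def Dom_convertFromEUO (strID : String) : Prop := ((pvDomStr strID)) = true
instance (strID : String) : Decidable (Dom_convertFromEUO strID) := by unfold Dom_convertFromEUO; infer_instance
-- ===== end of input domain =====

-- B replaces A's split-then-nested-loop by a single backward pass over the whole
-- string that Horner-accumulates and flushes a part at each underscore separator, assembling the
-- output back-to-front (objective: alternative).

-- '{:x}' of a nonnegative Nat: lowercase hex digits, no prefix (shared formatting helper)
def pvHexDigit (n : Nat) : Char := if n < 10 then Char.ofNat (48 + n) else Char.ofNat (87 + n)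

def pvHexNat (n : Nat) : List Char :=
  if _h : n < 16 then [pvHexDigit n]
  else pvHexNat (n / 16) ++ [pvHexDigit (n % 16)]
decreasing_by exact Nat.div_lt_self (by omega) (by omega)

-- "0x{:x}, ".format(d): Python formats a negative int as '-' followed by hex of |d|
def pvFmt (d : Int) : List Char :=
  ['0', 'x'] ++ (if d < 0 then '-' :: pvHexNat d.natAbs else pvHexNat d.toNat) ++ [',', ' ']

-- ===== PORT A =====
def convertFromEUO (strID : String) : String :=
  let test := PySem.Chars.upper strID.toList
  let testArray := PySem.Chars.splitOn test ['_']
  let result := testArray.foldl (fun (res : List Char) item =>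
    -- i = st.1, decid = st.2; decid += (ord c - ord 'A') * i; i *= 26
    let st := item.foldl (fun (st : Int × Int) c =>
      (st.1 * 26, st.2 + ((c.toNat : Int) - 65) * st.1)) (1, 0)
    res ++ pvFmt (PySem.Int.bxor (st.2 - 7) 69)) []
  String.ofList result

-- ===== PORT B =====
def convertFromEUO_alt (strID : String) : String :=
  -- parts = st.1 (appended at the end as in Python's .append), acc = st.2
  let st := (PySem.Chars.upper strID.toList).reverse.foldl
    (fun (st : List (List Char) × Int) c =>
      if c = '_' then (st.1 ++ [pvFmt (PySem.Int.bxor (st.2 - 7) 69)], 0)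
      else (st.1, st.2 * 26 + ((c.toNat : Int) - 65))) ([], 0)
  let parts := st.1 ++ [pvFmt (PySem.Int.bxor (st.2 - 7) 69)]
  String.ofList (PySem.Chars.join [] parts.reverse)

-- ===== PRECONDITION & SPEC =====
def Spec_convertFromEUO (strID : String) (out : String) : Prop := out = convertFromEUO_alt strID
instance (strID : String) (out : String) : Decidable (Spec_convertFromEUO strID out) := by unfold Spec_convertFromEUO; infer_instance

-- ===== CLAIM (what is proved, stated in full; the proofs are below) =====
def Claim_equal_convertFromEUO : Prop := ∀ (strID : String), Dom_convertFromEUO strID → Spec_convertFromEUO strID (convertFromEUO strID)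

-- ===== LEMMAS AND PROOFS =====

-- recursive characterization of splitOn on a single-char separator: (head token, remaining tokens)
def pvSplit (l : List Char) : List Char × List (List Char) :=
  match l with
  | [] => ([], [])
  | c :: rest =>
    let p := pvSplit rest
    if c = '_' then ([], p.1 :: p.2) else (c :: p.1, p.2)

theorem pvGo_eq (fuel : Nat) : ∀ (l cur : List Char) (acc : List (List Char)),
    l.length < fuel →
    PySem.Chars.splitOn.go ['_'] fuel l cur acc
      = acc.reverse ++ (cur.reverse ++ (pvSplit l).1) :: (pvSplit l).2 := by
  induction fuel with
  | zero => intro l cur acc h; omega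
  | succ n ih =>
    intro l cur acc h
    cases l with
    | nil => simp [PySem.Chars.splitOn.go, pvSplit]
    | cons c rest =>
      by_cases hc : c = '_'
      · subst hc
        rw [show PySem.Chars.splitOn.go ['_'] (n+1) ('_' :: rest) cur acc
              = PySem.Chars.splitOn.go ['_'] n rest [] (cur.reverse :: acc) by
            simp [PySem.Chars.splitOn.go, List.isPrefixOf]]
        rw [ih rest [] (cur.reverse :: acc) (by simpa using Nat.lt_of_succ_lt_succ h)]
        simp [pvSplit]
      · rw [show PySem.Chars.splitOn.go ['_'] (n+1) (c :: rest) cur acc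
              = PySem.Chars.splitOn.go ['_'] n rest (c :: cur) acc by
            simp [PySem.Chars.splitOn.go, List.isPrefixOf, Ne.symm hc]]
        rw [ih rest (c :: cur) acc (by simpa using Nat.lt_of_succ_lt_succ h)]
        simp [pvSplit, hc]

theorem pvSplitOn_eq (l : List Char) :
    PySem.Chars.splitOn l ['_'] = (pvSplit l).1 :: (pvSplit l).2 := by
  unfold PySem.Chars.splitOn
  rw [pvGo_eq (l.length + 1) l [] [] (by omega)]
  simp

-- little-endian base-26 value of a token, as B computes it (foldr = backward scan)
def pvVal (t : List Char) : Int := t.foldr (fun c a => a * 26 + ((c.toNat : Int) - 65)) 0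

def pvG (t : List Char) : List Char := pvFmt (PySem.Int.bxor (pvVal t - 7) 69)

-- A's inner power-accumulator fold computes the same little-endian value
theorem pvInner (cs : List Char) (i d : Int) :
    (cs.foldl (fun (st : Int × Int) c =>
      (st.1 * 26, st.2 + ((c.toNat : Int) - 65) * st.1)) (i, d)).2
    = d + i * pvVal cs := by
  induction cs generalizing i d with
  | nil => simp [pvVal]
  | cons c cs ih => simp [List.foldl_cons, pvVal, ih]; ring

-- B's backward scan produces the tail tokens' parts (in flush order) and the head token's value
theorem pvScan (l : List Char) :
    l.foldr (fun c (st : List (List Char) × Int) =>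
      if c = '_' then (st.1 ++ [pvFmt (PySem.Int.bxor (st.2 - 7) 69)], 0)
      else (st.1, st.2 * 26 + ((c.toNat : Int) - 65))) ([], 0)
    = (((pvSplit l).2.map pvG).reverse, pvVal (pvSplit l).1) := by
  induction l with
  | nil => simp [pvSplit, pvVal]
  | cons c l ih =>
    by_cases hc : c = '_'
    · subst hc; simp [pvSplit, ih, pvVal, pvG]
    · simp [pvSplit, hc, ih, pvVal]

theorem pvJoinNilSep (ps : List (List Char)) :
    PySem.Chars.join [] ps = ps.flatMap id := by
  induction ps with
  | nil => simp [PySem.Chars.join_nil]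
  | cons p ps ih =>
    cases ps with
    | nil => simp [PySem.Chars.join_singleton]
    | cons q qs => simp [PySem.Chars.join_cons_cons, ih]

-- ===== VERDICT (by name: the statement is the Claim_ definition above) =====
theorem convertFromEUO_spec : Claim_equal_convertFromEUO := by
  intro strID _
  unfold Spec_convertFromEUO convertFromEUO convertFromEUO_alt
  dsimp only
  rw [List.foldl_reverse]
  have hB := pvScan (PySem.Chars.upper strID.toList)
  rw [hB]
  rw [pvSplitOn_eq, PySem.List.foldl_append_eq_flatMap, pvJoinNilSep]
  have hf : (fun item : List Char =>
      pvFmt (PySem.Int.bxor ((item.foldl (fun (st : Int × Int) c =>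
        (st.1 * 26, st.2 + ((c.toNat : Int) - 65) * st.1)) (1, 0)).2 - 7) 69))
      = pvG := by
    funext item; rw [pvInner]; simp [pvG]
  simp [hf, List.flatMap_def, pvG]
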